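-- pv_equiv track=rewrite | github.com/mohamedisakr/ace-python-coding-interview | lists/cyclical_rotate/cycle_rotate.py | cyclic_rotate
-- ===== SOURCE A (Python) =====
-- def cyclic_rotate(arr):
--     n = len(arr)
--     if n == 0:
--         return arr
--
--     last_item = arr[-1]
--
--     for i in range(n - 1, 0, -1):
--         arr[i] = arr[i - 1]
--
--     arr[0] = last_item
--
--     return arr
-- ===== SOURCE B (Python) =====
-- def cyclic_rotate(arr):
--     arr[:] = arr[-1:] + arr[:-1]
--     return arr
-- ===== Notes on version B (the rewrite author's own statement) =====
-- stated objective: idiomatic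
-- what changed: Replaces the element-by-element backward shift loop with a single slice concatenation arr[-1:] + arr[:-1] assigned in place via arr[:], dropping the explicit length/empty-case handling.
import Mathlib
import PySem

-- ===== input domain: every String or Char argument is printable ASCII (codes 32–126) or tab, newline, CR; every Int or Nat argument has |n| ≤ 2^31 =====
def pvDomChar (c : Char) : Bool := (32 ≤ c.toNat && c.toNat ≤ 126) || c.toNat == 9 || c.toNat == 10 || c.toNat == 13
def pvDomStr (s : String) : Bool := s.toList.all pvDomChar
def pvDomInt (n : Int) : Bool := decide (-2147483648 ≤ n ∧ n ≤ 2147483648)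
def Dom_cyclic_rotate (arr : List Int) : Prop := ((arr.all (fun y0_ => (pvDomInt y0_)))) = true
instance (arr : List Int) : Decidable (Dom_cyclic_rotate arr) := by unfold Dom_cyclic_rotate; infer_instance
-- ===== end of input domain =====

-- B replaces A's backward shift loop by the slice concatenation arr[-1:] + arr[:-1] (idiomatic, same cost).
-- Both A and B mutate the caller's list in place in Python; the equivalence proved here is about the return value.

-- ===== PORT A =====
-- arr[i] = arr[i-1] inside the loop: index i ranges over 1..n-1 (positive, in range), so
-- List.set i.toNat and pyGetD with default 0 are exact here.
def cyclic_rotate (arr : List Int) : List Int :=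
  let n : Int := PySem.List.len arr
  if n = 0 then arr
  else
    let last_item : Int := PySem.List.pyGetD arr (-1) 0
    let arr1 := (PySem.List.pyRange (n - 1) 0 (-1)).foldl
      (fun a i => a.set i.toNat (PySem.List.pyGetD a (i - 1) 0)) arr
    arr1.set 0 last_item

-- ===== PORT B =====
def cyclic_rotate_alt (arr : List Int) : List Int :=
  PySem.List.slice arr (some (-1)) none ++ PySem.List.slice arr none (some (-1))

-- ===== PRECONDITION & SPEC =====
def Spec_cyclic_rotate (arr : List Int) (out : List Int) : Prop := out = cyclic_rotate_alt arr
instance (arr : List Int) (out : List Int) : Decidable (Spec_cyclic_rotate arr out) := by unfold Spec_cyclic_rotate; infer_instance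

-- ===== CLAIM (what is proved, stated in full; the proofs are below) =====
def Claim_equal_cyclic_rotate : Prop := ∀ (arr : List Int), Dom_cyclic_rotate arr → Spec_cyclic_rotate arr (cyclic_rotate arr)

-- ===== LEMMAS AND PROOFS =====

-- A's loop over range(n-1, 0, -1), run down to k, shifts positions 1..k up by one.
theorem cyclic_rotate_loop (k : Nat) : ∀ (a : List Int), k < a.length →
    (PySem.List.pyRange (k : Int) 0 (-1)).foldl
      (fun a i => a.set i.toNat (PySem.List.pyGetD a (i - 1) 0)) a
    = a.take 1 ++ a.take k ++ a.drop (k + 1) := by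
  induction k with
  | zero =>
    intro a _
    rw [PySem.List.pyRange_neg_one_eq_nil (by norm_num)]
    simp only [List.foldl_nil, List.take_zero, List.append_nil]
    rw [List.take_append_drop]
  | succ k ih =>
    intro a hlen
    have hk : k < a.length := by omega
    rw [show ((k + 1 : Nat) : Int) = (k : Int) + 1 by push_cast; ring]
    rw [PySem.List.pyRange_neg_one_cons (by omega)]
    simp only [List.foldl_cons]
    rw [show (k : Int) + 1 - 1 = (k : Int) by ring]
    have hset :
        a.set ((k : Int) + 1).toNat (PySem.List.pyGetD a (k : Int) 0)
        = a.set (k + 1) (a[k]'hk) := by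
      rw [show ((k : Int) + 1).toNat = k + 1 by omega, PySem.List.pyGetD_natCast,
        List.getD_eq_getElem a 0 hk]
    rw [hset, ih _ (by simp [List.length_set]; omega)]
    have h1 : (a.set (k + 1) (a[k]'hk)).take 1 = a.take 1 := by
      rw [List.take_set_of_le (by omega)]
    have h2 : (a.set (k + 1) (a[k]'hk)).take k = a.take k := by
      rw [List.take_set_of_le (by omega)]
    have h3 : (a.set (k + 1) (a[k]'hk)).drop (k + 1) = a[k]'hk :: a.drop (k + 2) := by
      apply List.ext_getElem
      · simp; omega
      · intro i hi1 hi2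
        rcases Nat.eq_zero_or_pos i with h | h
        · subst h
          simp
        · simp only [List.getElem_drop, List.getElem_set]
          rw [if_neg (by omega)]
          simp only [List.getElem_cons]
          rw [dif_neg (by omega), List.getElem_drop]
          congr 1
          omega
    have h4 : a.take (k + 1) = a.take k ++ [a[k]'hk] := by
      rw [List.take_add_one]
      simp [List.getElem?_eq_getElem hk]
    rw [h1, h2, h3, h4, show k + 1 + 1 = k + 2 from by omega]
    simp only [List.append_assoc, List.singleton_append]

theorem cyclic_rotate_spec_aux (arr : List Int) :
    cyclic_rotate arr = cyclic_rotate_alt arr := by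
  unfold cyclic_rotate cyclic_rotate_alt
  rw [PySem.List.slice_from_neg_one, PySem.List.slice_to_neg_one]
  by_cases hne : arr = []
  · subst hne; simp
  · have hpos : 0 < arr.length := List.length_pos_of_ne_nil hne
    simp only [PySem.List.len_eq]
    rw [if_neg (by exact_mod_cast Nat.pos_iff_ne_zero.mp hpos)]
    rw [show (arr.length : Int) - 1 = ((arr.length - 1 : Nat) : Int) by omega]
    rw [cyclic_rotate_loop (arr.length - 1) _ (by omega)]
    rw [show arr.length - 1 + 1 = arr.length by omega, List.drop_length, List.append_nil]
    rw [← List.dropLast_eq_take]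
    have hdrop1 : arr.drop (arr.length - 1) = [arr.getLast hne] := by
      obtain ⟨ys, y, hys⟩ := (arr.eq_nil_or_concat).resolve_left hne
      subst hys
      simp
    rw [hdrop1, PySem.List.pyGetD_neg_one arr 0 hne]
    obtain ⟨h0, t, he⟩ := List.exists_cons_of_ne_nil hne
    have htake : arr.take 1 = [h0] := by rw [he]; simp
    rw [htake, List.singleton_append, List.set_cons_zero]
    rfl

-- ===== VERDICT (by name: the statement is the Claim_ definition above) =====
theorem cyclic_rotate_spec : Claim_equal_cyclic_rotate := by
  intro arr _
  exact cyclic_rotate_spec_aux arr
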